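-- pv_equiv track=rewrite | github.com/albineb007/Scaler | server/app.py | _heuristic_action
-- ===== SOURCE A (Python) =====
-- def _heuristic_action(goal_text: str) -> tuple[str, str, str]:
--     text = goal_text.lower()
--
--     if any(token in text for token in ["price", "pricing", "subscription", "monthly"]):
--         return (
--             "adjust_pricing",
--             "tiered monthly subscription with pilot onboarding",
--             "Clarify monetization while keeping onboarding practical.",
--         )
--     if any(token in text for token in ["target", "audience", "market", "niche"]):
--         return (
--             "refine_market",
--             "independent local service businesses with repeat customers",
--             "Sharpen target audience to improve clarity and focus.",
--         )
--     if any(token in text for token in ["simpl", "scope", "reduce", "cut", "remove"]):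
--         return (
--             "reduce_scope",
--             "non-core analytics module",
--             "Reduce implementation complexity to increase feasibility.",
--         )
--     if any(token in text for token in ["feature", "differ", "novel", "innovation"]):
--         return (
--             "add_feature",
--             "lightweight referral loop",
--             "Add one focused differentiator without overloading complexity.",
--         )
--     if any(token in text for token in ["problem", "pivot", "position"]):
--         return (
--             "pivot_problem",
--             "help small businesses recover revenue lost from manual follow-up",
--             "Reframe the core problem to one with immediate business value.",
--         )
--
--     return (
--         "refine_market",
--         "multi-location independent operators in one vertical",
--         "Start by narrowing the market to increase strategic clarity.",
--     )
-- ===== SOURCE B (Python) =====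
-- _KEYWORDS = [
--     ("price", 0), ("pricing", 0), ("subscription", 0), ("monthly", 0),
--     ("target", 1), ("audience", 1), ("market", 1), ("niche", 1),
--     ("simpl", 2), ("scope", 2), ("reduce", 2), ("cut", 2), ("remove", 2),
--     ("feature", 3), ("differ", 3), ("novel", 3), ("innovation", 3),
--     ("problem", 4), ("pivot", 4), ("position", 4),
-- ]
--
-- _RESULTS = [
--     ("adjust_pricing",
--      "tiered monthly subscription with pilot onboarding",
--      "Clarify monetization while keeping onboarding practical."),
--     ("refine_market",
--      "independent local service businesses with repeat customers",
--      "Sharpen target audience to improve clarity and focus."),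
--     ("reduce_scope",
--      "non-core analytics module",
--      "Reduce implementation complexity to increase feasibility."),
--     ("add_feature",
--      "lightweight referral loop",
--      "Add one focused differentiator without overloading complexity."),
--     ("pivot_problem",
--      "help small businesses recover revenue lost from manual follow-up",
--      "Reframe the core problem to one with immediate business value."),
--     ("refine_market",
--      "multi-location independent operators in one vertical",
--      "Start by narrowing the market to increase strategic clarity."),
-- ]
--
--
-- def _heuristic_action(goal_text: str) -> tuple[str, str, str]:
--     text = goal_text.lower()
--     best = len(_RESULTS) - 1  # rank of the default result
--     for keyword, rank in _KEYWORDS: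
--         if keyword in text and rank < best:
--             best = rank
--     return _RESULTS[best]
-- ===== Notes on version B (the rewrite author's own statement) =====
-- stated objective: alternative
-- what changed: Replaced the five short-circuiting any()-branches by a single full pass over a flat keyword-to-rank list that keeps a minimal-rank accumulator, then indexes a results table with that rank (rank 5 = default).
import Mathlib
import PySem

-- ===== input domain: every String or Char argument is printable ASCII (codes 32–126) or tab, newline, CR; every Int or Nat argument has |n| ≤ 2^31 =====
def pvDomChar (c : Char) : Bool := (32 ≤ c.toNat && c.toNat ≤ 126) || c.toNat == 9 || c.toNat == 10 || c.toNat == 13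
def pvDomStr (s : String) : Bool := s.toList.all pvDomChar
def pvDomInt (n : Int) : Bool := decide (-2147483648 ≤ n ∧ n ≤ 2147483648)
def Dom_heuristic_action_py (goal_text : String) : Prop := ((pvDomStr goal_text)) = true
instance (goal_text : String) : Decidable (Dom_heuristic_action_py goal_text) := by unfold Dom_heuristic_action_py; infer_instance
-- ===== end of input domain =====

-- B replaces A's five short-circuiting any()-branches by one full pass over a flat keyword->rank list keeping a minimal-rank accumulator, then indexes a results table; alternative decomposition, same behaviour.


-- ===== PORT A =====
def heuristic_action_py (goal_text : String) : String × String × String :=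
  let text := PySem.Str.lower goal_text
  if ["price", "pricing", "subscription", "monthly"].any (fun token => PySem.Str.isIn token text) then
    ("adjust_pricing",
     "tiered monthly subscription with pilot onboarding",
     "Clarify monetization while keeping onboarding practical.")
  else if ["target", "audience", "market", "niche"].any (fun token => PySem.Str.isIn token text) then
    ("refine_market",
     "independent local service businesses with repeat customers",
     "Sharpen target audience to improve clarity and focus.")
  else if ["simpl", "scope", "reduce", "cut", "remove"].any (fun token => PySem.Str.isIn token text) then
    ("reduce_scope",
     "non-core analytics module",
     "Reduce implementation complexity to increase feasibility.")
  else if ["feature", "differ", "novel", "innovation"].any (fun token => PySem.Str.isIn token text) then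
    ("add_feature",
     "lightweight referral loop",
     "Add one focused differentiator without overloading complexity.")
  else if ["problem", "pivot", "position"].any (fun token => PySem.Str.isIn token text) then
    ("pivot_problem",
     "help small businesses recover revenue lost from manual follow-up",
     "Reframe the core problem to one with immediate business value.")
  else
    ("refine_market",
     "multi-location independent operators in one vertical",
     "Start by narrowing the market to increase strategic clarity.")

-- ===== PORT B =====
def pvKeywords : List (String × Nat) :=
  [("price", 0), ("pricing", 0), ("subscription", 0), ("monthly", 0),
   ("target", 1), ("audience", 1), ("market", 1), ("niche", 1),
   ("simpl", 2), ("scope", 2), ("reduce", 2), ("cut", 2), ("remove", 2),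
   ("feature", 3), ("differ", 3), ("novel", 3), ("innovation", 3),
   ("problem", 4), ("pivot", 4), ("position", 4)]

def pvResults : List (String × String × String) :=
  [("adjust_pricing",
    "tiered monthly subscription with pilot onboarding",
    "Clarify monetization while keeping onboarding practical."),
   ("refine_market",
    "independent local service businesses with repeat customers",
    "Sharpen target audience to improve clarity and focus."),
   ("reduce_scope",
    "non-core analytics module",
    "Reduce implementation complexity to increase feasibility."),
   ("add_feature",
    "lightweight referral loop",
    "Add one focused differentiator without overloading complexity."),
   ("pivot_problem",
    "help small businesses recover revenue lost from manual follow-up",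
    "Reframe the core problem to one with immediate business value."),
   ("refine_market",
    "multi-location independent operators in one vertical",
    "Start by narrowing the market to increase strategic clarity.")]

def heuristic_action_py_alt (goal_text : String) : String × String × String :=
  let text := PySem.Str.lower goal_text
  -- the 'for keyword, rank in _KEYWORDS' loop keeping the minimal matched rank (default rank 5)
  let best := pvKeywords.foldl
    (fun b kg => if PySem.Str.isIn kg.1 text ∧ kg.2 < b then kg.2 else b)
    (pvResults.length - 1)
  -- Python `_RESULTS[best]`: best ≤ 5 < len(_RESULTS) always, so plain list indexing is exact
  pvResults.getD best ("", "", "")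

-- ===== PRECONDITION & SPEC =====
def Spec_heuristic_action_py (goal_text : String) (out : String × String × String) : Prop := out = heuristic_action_py_alt goal_text
instance (goal_text : String) (out : String × String × String) : Decidable (Spec_heuristic_action_py goal_text out) := by unfold Spec_heuristic_action_py; infer_instance

-- ===== CLAIM (what is proved, stated in full; the proofs are below) =====
def Claim_equal_heuristic_action_py : Prop := ∀ (goal_text : String), Dom_heuristic_action_py goal_text → Spec_heuristic_action_py goal_text (heuristic_action_py goal_text)

-- ===== LEMMAS AND PROOFS =====

-- folding B's min-rank step over one keyword group (all ranks = g) lowers the accumulator to g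
-- exactly when some keyword of the group occurs and g < acc
theorem pv_group_fold (text : String) (ks : List String) (g : Nat) (acc : Nat) :
    List.foldl (fun b kg => if PySem.Str.isIn kg.1 text ∧ kg.2 < b then kg.2 else b) acc
      (ks.map (fun k => (k, g)))
    = if ks.any (fun k => PySem.Str.isIn k text) ∧ g < acc then g else acc := by
  induction ks generalizing acc with
  | nil => simp
  | cons k ks ih =>
    simp only [List.map_cons, List.foldl_cons, List.any_cons]
    rw [ih]
    by_cases hk : PySem.Str.isIn k text = true
    · rw [PySem.Str.isIn_eq] at hk
      by_cases hg : g < acc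
      · simp [hk, hg, lt_self_iff_false]
      · simp [hk, hg]
    · simp only [Bool.not_eq_true, PySem.Str.isIn_eq] at hk
      simp [hk]

-- ===== VERDICT (by name: the statement is the Claim_ definition above) =====
theorem heuristic_action_py_spec : Claim_equal_heuristic_action_py := by
  intro goal_text _
  unfold Spec_heuristic_action_py heuristic_action_py heuristic_action_py_alt
  have hsplit : pvKeywords =
      (["price", "pricing", "subscription", "monthly"].map (fun k => (k, (0 : Nat)))) ++
      (["target", "audience", "market", "niche"].map (fun k => (k, (1 : Nat)))) ++
      (["simpl", "scope", "reduce", "cut", "remove"].map (fun k => (k, (2 : Nat)))) ++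
      (["feature", "differ", "novel", "innovation"].map (fun k => (k, (3 : Nat)))) ++
      (["problem", "pivot", "position"].map (fun k => (k, (4 : Nat)))) := rfl
  simp only []
  generalize PySem.Str.lower goal_text = text
  cases hc0 : ["price", "pricing", "subscription", "monthly"].any (fun token => PySem.Str.isIn token text) <;>
  cases hc1 : ["target", "audience", "market", "niche"].any (fun token => PySem.Str.isIn token text) <;>
  cases hc2 : ["simpl", "scope", "reduce", "cut", "remove"].any (fun token => PySem.Str.isIn token text) <;>
  cases hc3 : ["feature", "differ", "novel", "innovation"].any (fun token => PySem.Str.isIn token text) <;>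
  cases hc4 : ["problem", "pivot", "position"].any (fun token => PySem.Str.isIn token text) <;>
  simp only [hsplit, List.foldl_append, pv_group_fold, hc0, hc1, hc2, hc3, hc4] <;> decide
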